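-- pv_equiv track=rewrite | github.com/jonnychan01/nfl-fantasy-predictor | api/predictor.py | consecutive_zero_seasons
-- ===== SOURCE A (Python) =====
-- def consecutive_zero_seasons(seasons: dict) -> int:
--     season_keys = sorted(seasons.keys(), reverse=True)
--     count = 0
--
--     for key in season_keys:
--         if seasons[key].get("games_played", 0) == 0:
--             count += 1
--         else:
--             break
--
--     return count
-- ===== SOURCE B (Python) =====
-- def consecutive_zero_seasons(seasons: dict) -> int:
--     nonzero = [k for k, v in seasons.items() if v.get("games_played", 0) != 0]
--     if not nonzero:
--         return len(seasons)
--     newest = max(nonzero)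
--     return sum(1 for k in seasons if k > newest)
-- ===== Notes on version B (the rewrite author's own statement) =====
-- stated objective: alternative
-- what changed: Replaces A's sort-descending-then-break scan with a threshold-then-count decomposition: find the newest season with nonzero games_played and count the keys above it, with no sorting and no early-exit loop.
import Mathlib
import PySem

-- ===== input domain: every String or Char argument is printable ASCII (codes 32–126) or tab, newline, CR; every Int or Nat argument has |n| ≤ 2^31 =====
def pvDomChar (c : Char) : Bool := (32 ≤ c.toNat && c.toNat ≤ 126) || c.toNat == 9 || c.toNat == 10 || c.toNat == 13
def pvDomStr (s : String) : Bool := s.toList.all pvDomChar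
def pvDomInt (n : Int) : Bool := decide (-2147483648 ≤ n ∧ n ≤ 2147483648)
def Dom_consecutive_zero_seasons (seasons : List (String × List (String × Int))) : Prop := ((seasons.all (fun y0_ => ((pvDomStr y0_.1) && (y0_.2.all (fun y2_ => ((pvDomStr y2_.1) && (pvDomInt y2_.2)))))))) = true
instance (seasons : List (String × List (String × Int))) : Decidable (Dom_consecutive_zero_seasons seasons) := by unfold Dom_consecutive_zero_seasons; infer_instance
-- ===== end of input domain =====

-- B replaces A's sort-descending-then-break scan by a threshold-then-count decomposition
-- (newest nonzero season, then count keys above it): an alternative, structurally different algorithm.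


-- ===== PORT A =====
-- v.get("games_played", 0), shared by both ports (the same Python expression occurs in A and in B)
def pvGamesPlayed (v : List (String × Int)) : Int :=
  (PySem.Dict.mk v).getD "games_played" 0

-- the 'for key in season_keys: … else: break' loop of A (seasons[key] is total here: key comes from seasons.keys())
def czsLoop (seasons : List (String × List (String × Int))) : List String → Int → Int
  | [], count => count
  | key :: rest, count =>
    if pvGamesPlayed ((PySem.Dict.mk seasons).getD key []) == 0 then
      czsLoop seasons rest (count + 1)
    else count

def consecutive_zero_seasons (seasons : List (String × List (String × Int))) : Int :=
  czsLoop seasons (PySem.List.sorted (PySem.Dict.mk seasons).keys (fun k => k) true) 0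

-- ===== PORT B =====
-- the list comprehension 'nonzero = [k for k, v in seasons.items() if v.get("games_played", 0) != 0]'
def pvNonzero (seasons : List (String × List (String × Int))) : List String :=
  ((PySem.Dict.mk seasons).items.filter (fun p => !(pvGamesPlayed p.2 == 0))).map (fun p => p.1)

def consecutive_zero_seasons_alt (seasons : List (String × List (String × Int))) : Int :=
  match PySem.List.max? (pvNonzero seasons) (fun k => k) with
  | none => PySem.Dict.size (PySem.Dict.mk seasons)
  | some newest => ((PySem.Dict.mk seasons).keys.countP (fun k => decide (newest < k)) : Int)

-- ===== PRECONDITION & SPEC =====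
-- Pre_ excludes association lists with duplicate outer keys: such lists are not the image of any
-- Python dict (dict keys are unique), so the dict behaviour on them is accidental.
def Pre_consecutive_zero_seasons (seasons : List (String × List (String × Int))) : Prop :=
  (seasons.map Prod.fst).Nodup
instance (seasons : List (String × List (String × Int))) : Decidable (Pre_consecutive_zero_seasons seasons) := by unfold Pre_consecutive_zero_seasons; infer_instance

def pvWitness_consecutive_zero_seasons : (List (String × List (String × Int))) :=
  [("2021", [("games_played", 0)]), ("2020", [("games_played", 3)]), ("2019", [])]

def Spec_consecutive_zero_seasons (seasons : List (String × List (String × Int))) (out : Int) : Prop := out = consecutive_zero_seasons_alt seasons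
instance (seasons : List (String × List (String × Int))) (out : Int) : Decidable (Spec_consecutive_zero_seasons seasons out) := by unfold Spec_consecutive_zero_seasons; infer_instance

-- ===== CLAIM (what is proved, stated in full; the proofs are below) =====
def Claim_equal_consecutive_zero_seasons : Prop := ∀ (seasons : List (String × List (String × Int))), Dom_consecutive_zero_seasons seasons → Pre_consecutive_zero_seasons seasons → Spec_consecutive_zero_seasons seasons (consecutive_zero_seasons seasons)

-- ===== LEMMAS AND PROOFS =====

-- the zero test A applies to a key (lookup through the outer dict)
def pvZeroKey (seasons : List (String × List (String × Int))) (k : String) : Bool :=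
  pvGamesPlayed ((PySem.Dict.mk seasons).getD k []) == 0

lemma czsLoop_eq_takeWhile (seasons : List (String × List (String × Int))) :
    ∀ (xs : List String) (c : Int),
      czsLoop seasons xs c = c + ((xs.takeWhile (pvZeroKey seasons)).length : Int) := by
  intro xs
  induction xs with
  | nil => intro c; simp [czsLoop]
  | cons k rest ih =>
    intro c
    simp only [czsLoop]
    by_cases h : pvGamesPlayed ((PySem.Dict.mk seasons).getD k []) = 0
    · rw [if_pos (by simp [h]), ih, List.takeWhile_cons_of_pos (by simp [pvZeroKey, h])]
      simp only [List.length_cons]; push_cast; ring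
    · rw [if_neg (by simp [h]), List.takeWhile_cons_of_neg (by simp [pvZeroKey, h])]
      simp

-- core counting fact: on a descending list, the leading run of zeros is exactly the
-- set of keys above the greatest non-zero key.
lemma takeWhile_len_eq_countP (p : String → Bool) (m : String) :
    ∀ ds : List String, ds.Pairwise (fun a b => b ≤ a) →
      (∀ k ∈ ds, p k = false → k ≤ m) →
      m ∈ ds → p m = false →
      (ds.takeWhile p).length = ds.countP (fun k => decide (m < k)) := by
  intro ds
  induction ds with
  | nil => intro _ _ hm _; simp at hm
  | cons x t ih =>
    intro pw h2 hm hpm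
    by_cases hx : p x = true
    · have hxm : x ≠ m := fun h => by rw [h, hpm] at hx; simp at hx
      have hmt : m ∈ t := by
        rcases List.mem_cons.mp hm with h | h
        · exact absurd h.symm hxm
        · exact h
      have hmx : m < x := lt_of_le_of_ne ((List.pairwise_cons.mp pw).1 m hmt) (fun h => hxm h.symm)
      rw [List.takeWhile_cons_of_pos hx]
      have : (List.countP (fun k => decide (m < k)) (x :: t)) =
          List.countP (fun k => decide (m < k)) t + 1 := by
        rw [List.countP_cons_of_pos]; simp [hmx]
      rw [this]
      simp only [List.length_cons]
      rw [ih (List.pairwise_cons.mp pw).2 (fun k hk h => h2 k (List.mem_cons_of_mem _ hk) h) hmt hpm]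
    · simp only [Bool.not_eq_true] at hx
      rw [List.takeWhile_cons_of_neg (by simp [hx])]
      have hxm : x ≤ m := h2 x (List.mem_cons_self) hx
      have : List.countP (fun k => decide (m < k)) (x :: t) = 0 := by
        rw [List.countP_eq_zero]
        intro k hk
        rcases List.mem_cons.mp hk with h | h
        · subst h; simpa using not_lt.mpr hxm
        · have : k ≤ x := (List.pairwise_cons.mp pw).1 k h
          simpa using not_lt.mpr (le_trans this hxm)
      rw [this]; rfl

-- with distinct keys, B's nonzero list is the list of keys failing the zero test
lemma nonzero_char (seasons : List (String × List (String × Int)))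
    (hnd : (seasons.map Prod.fst).Nodup) :
    pvNonzero seasons
      = ((PySem.Dict.mk seasons).keys.filter (fun k => !(pvZeroKey seasons k))) := by
  unfold pvNonzero
  have hkeys : (PySem.Dict.mk seasons).keys = seasons.map Prod.fst := rfl
  have hitems : (PySem.Dict.mk seasons).items = seasons := rfl
  rw [hitems, hkeys]
  have hcongr : seasons.filter (fun p => !(pvGamesPlayed p.2 == 0))
      = seasons.filter (fun p => !(pvZeroKey seasons p.1)) := by
    apply List.filter_congr
    intro q hq
    have : (PySem.Dict.mk seasons).getD q.1 [] = q.2 :=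
      PySem.Dict.getD_of_mem_items (PySem.Dict.mk seasons) (by simpa [hitems] using hq)
        (by simpa [hkeys] using hnd) []
    simp [pvZeroKey, this]
  rw [hcongr, List.filter_map]
  rfl

-- ===== VERDICT (by name: the statement is the Claim_ definition above) =====
theorem consecutive_zero_seasons_spec : Claim_equal_consecutive_zero_seasons := by
  intro seasons _ hpre
  unfold Spec_consecutive_zero_seasons
  unfold consecutive_zero_seasons consecutive_zero_seasons_alt
  rw [czsLoop_eq_takeWhile, nonzero_char seasons hpre]
  have hperm : (PySem.List.sorted (PySem.Dict.mk seasons).keys (fun k => k) true).Perm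
      (PySem.Dict.mk seasons).keys := PySem.List.sorted_perm _ _ _
  cases hmax : PySem.List.max?
      ((PySem.Dict.mk seasons).keys.filter (fun k => !(pvZeroKey seasons k))) (fun k => k) with
  | none =>
    dsimp only
    have hempty := (PySem.List.max?_eq_none_iff _ _).mp hmax
    have hall : ∀ k ∈ PySem.List.sorted (PySem.Dict.mk seasons).keys (fun k => k) true,
        pvZeroKey seasons k = true := by
      intro k hk
      have hk' : k ∈ (PySem.Dict.mk seasons).keys := hperm.mem_iff.mp hk
      by_contra h
      have hkf : k ∈ (PySem.Dict.mk seasons).keys.filter (fun k => !(pvZeroKey seasons k)) :=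
        List.mem_filter.mpr ⟨hk', by simp [Bool.eq_false_iff.mpr h]⟩
      rw [hempty] at hkf
      exact absurd hkf (List.not_mem_nil)
    rw [List.takeWhile_eq_self_iff.mpr hall]
    have hlen : (PySem.List.sorted (PySem.Dict.mk seasons).keys (fun k => k) true).length
        = seasons.length := by
      rw [hperm.length_eq]; simp [PySem.Dict.keys]
    rw [hlen]
    simp [PySem.Dict.size]
  | some m =>
    dsimp only
    have hmmem := PySem.List.max?_mem hmax
    have hmks : m ∈ (PySem.Dict.mk seasons).keys := (List.mem_filter.mp hmmem).1
    have hpm : pvZeroKey seasons m = false := by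
      have := (List.mem_filter.mp hmmem).2; simpa using this
    have h2 : ∀ k ∈ PySem.List.sorted (PySem.Dict.mk seasons).keys (fun k => k) true,
        pvZeroKey seasons k = false → k ≤ m := by
      intro k hk hpk
      exact PySem.List.max?_isMax hmax k
        (List.mem_filter.mpr ⟨hperm.mem_iff.mp hk, by simp [hpk]⟩)
    rw [takeWhile_len_eq_countP (pvZeroKey seasons) m _
      (PySem.List.sorted_pairwise_rev _ _) h2 (hperm.mem_iff.mpr hmks) hpm]
    rw [hperm.countP_eq]
    omega
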